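-- pv_equiv track=rewrite | github.com/LaplaceFox/project-euler | pe119.py | isPowerOf
-- ===== SOURCE A (Python) =====
-- def isPowerOf(n,k):
-- 	# Is n a power of k?
-- 	pw = 1
--
-- 	if k in [0,1]:
-- 		return n == k
--
-- 	while pw <= n:
-- 		if pw == n:
-- 			return True
-- 		pw *= k
-- 	return False
-- ===== SOURCE B (Python) =====
-- def isPowerOf(n, k):
--     # Is n a power of k? Divide n down by k instead of multiplying a power up.
--     if k in [0, 1]:
--         return n == k
--     if k == -1:
--         # the division loop would cycle forever; powers of -1 reachable here: 1
--         return n == 1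
--     if n < 1:
--         return False
--     x = n
--     while x % k == 0:
--         x //= k
--     return x == 1
-- ===== Notes on version B (the rewrite author's own statement) =====
-- stated objective: alternative
-- what changed: B checks divisibility top-down: it strips factors of k from n by repeated exact floor division and tests whether the remainder is 1, instead of A's bottom-up multiplication of a running power until it passes n.
import Mathlib
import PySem

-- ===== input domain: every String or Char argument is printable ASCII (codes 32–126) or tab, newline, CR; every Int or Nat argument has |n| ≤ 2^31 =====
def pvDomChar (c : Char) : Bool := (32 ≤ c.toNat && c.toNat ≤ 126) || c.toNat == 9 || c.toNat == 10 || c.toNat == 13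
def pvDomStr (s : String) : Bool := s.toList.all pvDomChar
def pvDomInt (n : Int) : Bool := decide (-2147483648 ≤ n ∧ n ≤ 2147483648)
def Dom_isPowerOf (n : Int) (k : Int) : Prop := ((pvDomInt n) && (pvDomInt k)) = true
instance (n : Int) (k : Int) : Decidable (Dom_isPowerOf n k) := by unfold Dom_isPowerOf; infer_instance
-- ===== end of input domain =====

-- B replaces A's bottom-up multiplication of a running power by a top-down strip of factors of k
-- via exact floor division (objective: alternative, same asymptotic cost).

-- ===== PORT A =====
-- while pw <= n: if pw == n: return True; pw *= k
-- fuel makes the loop total; 100 steps are proved sufficient on Dom ∧ Pre_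
def pvPowLoop (n k : Int) : Nat → Int → Bool
  | 0, _ => false
  | f + 1, pw =>
      if pw ≤ n then (if pw = n then true else pvPowLoop n k f (pw * k)) else false

def isPowerOf (n : Int) (k : Int) : Bool :=
  if k = 0 ∨ k = 1 then decide (n = k)
  else pvPowLoop n k 100 1

-- ===== PORT B =====
-- while x % k == 0: x //= k      (fuel n.natAbs is proved sufficient; the loop halves |x| each step)
def pvDivLoop (k : Int) : Nat → Int → Int
  | 0, x => x
  | f + 1, x =>
      if PySem.Int.mod x k = 0 then pvDivLoop k f (PySem.Int.floordiv x k) else x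

def isPowerOf_alt (n : Int) (k : Int) : Bool :=
  if k = 0 ∨ k = 1 then decide (n = k)
  else if k = -1 then decide (n = 1)
  else if n < 1 then false
  else decide (pvDivLoop k n.natAbs n = 1)

-- ===== PRECONDITION & SPEC =====
-- Pre_ excludes only k = -1 with n ≥ 2, where Python A loops forever (pw cycles 1,-1,…); A returns on everything else.
def Pre_isPowerOf (n : Int) (k : Int) : Prop := ¬ (k = -1 ∧ 2 ≤ n)
instance (n : Int) (k : Int) : Decidable (Pre_isPowerOf n k) := by unfold Pre_isPowerOf; infer_instance
def pvWitness_isPowerOf : Int × Int := (8, 2)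

def Spec_isPowerOf (n : Int) (k : Int) (out : Bool) : Prop := out = isPowerOf_alt n k
instance (n : Int) (k : Int) (out : Bool) : Decidable (Spec_isPowerOf n k out) := by unfold Spec_isPowerOf; infer_instance

-- ===== CLAIM (what is proved, stated in full; the proofs are below) =====
def Claim_equal_isPowerOf : Prop := ∀ (n : Int) (k : Int), Dom_isPowerOf n k → Pre_isPowerOf n k → Spec_isPowerOf n k (isPowerOf n k)

-- ===== LEMMAS AND PROOFS =====

lemma pvPowLoop_sound (n k : Int) : ∀ (f : Nat) (pw : Int),
    pvPowLoop n k f pw = true → ∃ j : Nat, pw * k ^ j = n := by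
  intro f
  induction f with
  | zero => intro pw h; simp [pvPowLoop] at h
  | succ f ih =>
    intro pw h
    rw [pvPowLoop] at h
    split_ifs at h with h1 h2
    · exact ⟨0, by simp [h2]⟩
    · obtain ⟨j, hj⟩ := ih (pw * k) h
      exact ⟨j + 1, by rw [← hj]; ring⟩

lemma pvPowLoop_complete (n k : Int) (m : Nat) (hk : 2 ≤ k.natAbs) (hn : 1 ≤ n)
    (hm : k ^ m = n) : ∀ (f : Nat), ∀ i ≤ m, m - i < f → pvPowLoop n k f (k ^ i) = true := by
  intro f
  induction f with
  | zero => intro i _ h; omega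
  | succ f ih =>
    intro i hi hf
    rw [pvPowLoop]
    by_cases he : i = m
    · subst he
      rw [hm]
      simp
    · have hilt : i < m := lt_of_le_of_ne hi he
      have h1 : k ^ i ≤ ((k.natAbs ^ i : Nat) : Int) := by
        calc k ^ i ≤ |k ^ i| := le_abs_self _
          _ = ((k.natAbs ^ i : Nat) : Int) := by
              rw [Int.abs_eq_natAbs, Int.natAbs_pow]
      have h2 : (k.natAbs ^ i : Nat) < k.natAbs ^ m := Nat.pow_lt_pow_right (by omega) hilt
      have h3 : (k.natAbs ^ m : Nat) = n.natAbs := by rw [← Int.natAbs_pow, hm]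
      have hlt : k ^ i < n := by omega
      rw [if_pos (le_of_lt hlt), if_neg (ne_of_lt hlt)]
      have hp : k ^ i * k = k ^ (i + 1) := (pow_succ k i).symm
      rw [hp]
      exact ih (i + 1) hilt (by omega)

lemma pvFloordiv_mul_cancel (k y : Int) (hk : k ≠ 0) : PySem.Int.floordiv (k * y) k = y := by
  have h0 : PySem.Int.mod (k * y) k = 0 := (PySem.Int.mod_eq_zero_iff_dvd _ _).mpr ⟨y, rfl⟩
  have h := PySem.Int.floordiv_mul_add_mod (k * y) k
  rw [h0, add_zero] at h
  exact mul_right_cancel₀ hk (h.trans (mul_comm k y))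

lemma pvMod_one_ne (k : Int) (hk : 2 ≤ k.natAbs) : PySem.Int.mod 1 k ≠ 0 := by
  intro h
  have hd : k ∣ 1 := (PySem.Int.mod_eq_zero_iff_dvd 1 k).mp h
  have : k.natAbs ∣ (1 : Int).natAbs := Int.natAbs_dvd_natAbs.mpr hd
  simp at this
  omega

lemma pvDivLoop_complete (k : Int) (hk : 2 ≤ k.natAbs) :
    ∀ (m f : Nat), m ≤ f → pvDivLoop k f (k ^ m) = 1 := by
  intro m
  induction m with
  | zero =>
    intro f _
    rw [pow_zero]
    cases f with
    | zero => rfl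
    | succ f => rw [pvDivLoop, if_neg (pvMod_one_ne k hk)]
  | succ m ihm =>
    intro f hf
    obtain ⟨f', rfl⟩ : ∃ f', f = f' + 1 := ⟨f - 1, by omega⟩
    have hk0 : k ≠ 0 := by intro h; subst h; simp at hk
    have hup : k ^ (m + 1) = k * k ^ m := by ring
    have hd : PySem.Int.mod (k ^ (m + 1)) k = 0 :=
      (PySem.Int.mod_eq_zero_iff_dvd _ _).mpr ⟨k ^ m, hup⟩
    rw [pvDivLoop, if_pos hd, hup, pvFloordiv_mul_cancel k _ hk0]
    exact ihm f' (by omega)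

lemma pvDivLoop_sound (k : Int) (hk : 2 ≤ k.natAbs) : ∀ (f : Nat) (x : Int),
    pvDivLoop k f x = 1 → ∃ m : Nat, k ^ m = x := by
  intro f
  induction f with
  | zero =>
    intro x h
    exact ⟨0, by rw [pow_zero]; exact h.symm⟩
  | succ f ih =>
    intro x h
    rw [pvDivLoop] at h
    split_ifs at h with hm
    · have hk0 : k ≠ 0 := by intro h0; subst h0; simp at hk
      obtain ⟨c, hc⟩ := (PySem.Int.mod_eq_zero_iff_dvd _ _).mp hm
      have hfl : PySem.Int.floordiv x k = c := by rw [hc]; exact pvFloordiv_mul_cancel k c hk0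
      obtain ⟨m, hm'⟩ := ih _ h
      exact ⟨m + 1, by rw [pow_succ, mul_comm, hm', hfl, ← hc]⟩
    · exact ⟨0, by rw [pow_zero]; exact h.symm⟩

-- main case |k| ≥ 2, 1 ≤ n, n ≤ 2^31: both loops decide ∃ m, k ^ m = n
lemma pvMain (n k : Int) (hk : 2 ≤ k.natAbs) (hn : 1 ≤ n) (hbound : n ≤ 2147483648) :
    pvPowLoop n k 100 1 = decide (pvDivLoop k n.natAbs n = 1) := by
  rw [Bool.eq_iff_iff]
  simp only [decide_eq_true_eq]
  constructor
  · intro hA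
    obtain ⟨m, hm⟩ := pvPowLoop_sound n k 100 1 hA
    rw [one_mul] at hm
    have hfuel : m < n.natAbs := by
      have h1 : (2 : Nat) ^ m ≤ k.natAbs ^ m := Nat.pow_le_pow_left hk m
      have h2 : (k.natAbs ^ m : Nat) = n.natAbs := by rw [← Int.natAbs_pow, hm]
      have h3 : m < 2 ^ m := Nat.lt_two_pow_self
      omega
    have := pvDivLoop_complete k hk m n.natAbs (by omega)
    rwa [hm] at this
  · intro hB
    obtain ⟨m, hm⟩ := pvDivLoop_sound k hk n.natAbs n hB
    have hmle : m ≤ 31 := by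
      have h1 : (2 : Nat) ^ m ≤ k.natAbs ^ m := Nat.pow_le_pow_left hk m
      have h2 : (k.natAbs ^ m : Nat) = n.natAbs := by rw [← Int.natAbs_pow, hm]
      by_contra hc
      have h4 : (2 : Nat) ^ 32 ≤ 2 ^ m := Nat.pow_le_pow_right (by omega) (by omega)
      have h5 : (2 : Nat) ^ 32 = 4294967296 := by norm_num
      omega
    have := pvPowLoop_complete n k m hk hn hm 100 0 (by omega) (by omega)
    rwa [pow_zero] at this

-- A's loop at fuel 100 returns false immediately when n < 1
lemma pvPowLoop_neg (n k : Int) (hn : n < 1) : pvPowLoop n k 100 1 = false := by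
  rw [show (100 : Nat) = 99 + 1 from rfl, pvPowLoop, if_neg (by omega)]

-- ===== VERDICT (by name: the statement is the Claim_ definition above) =====
theorem isPowerOf_spec : Claim_equal_isPowerOf := by
  intro n k hDom hPre
  unfold Spec_isPowerOf isPowerOf isPowerOf_alt
  simp only [Dom_isPowerOf, pvDomInt, Bool.and_eq_true, decide_eq_true_eq] at hDom
  by_cases h01 : k = 0 ∨ k = 1
  · rw [if_pos h01, if_pos h01]
  · rw [if_neg h01, if_neg h01]
    by_cases hm1 : k = -1
    · subst hm1
      have hn1 : n ≤ 1 := by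
        unfold Pre_isPowerOf at hPre
        omega
      rw [if_pos rfl]
      by_cases he : n = 1
      · subst he; decide
      · rw [pvPowLoop_neg n (-1) (by omega)]
        simp [he]
    · rw [if_neg hm1]
      have hk : 2 ≤ k.natAbs := by
        push Not at h01
        omega
      by_cases hn : n < 1
      · rw [if_pos hn, pvPowLoop_neg n k hn]
      · rw [if_neg hn]
        exact pvMain n k hk (by omega) (by omega)
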